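-- pv_equiv track=rewrite | github.com/John-C-Currie/CIS1051finalproject | functions.py | funcsplit
-- ===== SOURCE A (Python) =====
-- def funcsplit(func):
--     parts = []
--     coefs = []
--     part = ''
--     coef = ''
--     for ele,i in enumerate(func):
--         if i != '(' and len(part) < 1:
--             coef += i
--         elif i == '(' or len(part) > 0:
--             part += i
--         if ele < len(func) - 1:
--             if i == ')' and func[ele+1] != ')':
--                 part = part[1:-1]
--                 parts.append(part)
--                 if coef == '':
--                     coefs.append('+1')
--                 else:
--                     coefs.append(coef)
--                 part = ''
--                 coef = ''
--         elif i == ')':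
--                 part = part[1:-1]
--                 parts.append(part)
--                 if coef == '':
--                     coefs.append('+1')
--                 else:
--                     coefs.append(coef)
--                 part = ''
--                 coef = ''
--     return parts, coefs
-- ===== SOURCE B (Python) =====
-- def funcsplit(func):
--     # Recursive segment splitter: find the next boundary ')', slice the segment,
--     # emit (part, coef) from the slice, recurse on the remainder (built back-to-front).
--     def next_boundary(s):
--         for j in range(len(s)):
--             if s[j] == ')' and (j == len(s) - 1 or s[j + 1] != ')'):
--                 return j
--         return None
--
--     def split(s):
--         j = next_boundary(s)
--         if j is None:
--             return [], []
--         seg, rest = s[:j + 1], s[j + 1:]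
--         k = seg.find('(')
--         if k == -1:
--             part, coef = '', seg
--         else:
--             part, coef = seg[k + 1:-1], seg[:k]
--         parts, coefs = split(rest)
--         return [part] + parts, [(coef if coef != '' else '+1')] + coefs
--
--     return split(func)
-- ===== Notes on version B (the rewrite author's own statement) =====
-- stated objective: alternative
-- what changed: A runs a four-field per-character state machine (parts/coefs/part/coef with lookahead flushes); B finds the next boundary ')', slices the segment off, emits part/coef from the slice via find('(') and recurses on the remainder.
import Mathlib
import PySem

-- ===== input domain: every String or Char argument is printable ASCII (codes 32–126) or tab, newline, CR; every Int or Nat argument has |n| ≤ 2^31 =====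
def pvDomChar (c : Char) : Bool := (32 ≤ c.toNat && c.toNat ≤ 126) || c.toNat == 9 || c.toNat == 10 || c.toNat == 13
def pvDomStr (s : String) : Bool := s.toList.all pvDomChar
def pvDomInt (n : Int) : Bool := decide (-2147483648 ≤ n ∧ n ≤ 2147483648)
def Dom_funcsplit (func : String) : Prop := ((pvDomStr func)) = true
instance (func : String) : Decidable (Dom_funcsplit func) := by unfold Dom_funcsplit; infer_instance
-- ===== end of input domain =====

-- B replaces A's four-field per-character state machine by a recursive segment splitter
-- (find the next boundary ')', slice the segment, emit part/coef from the slice); same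
-- return value; a timing run measured B faster by a constant factor (slicing vs per-char appends).

-- ===== PORT A =====
-- the per-character accumulation step of A's loop:
--   if i != '(' and len(part) < 1: coef += i
--   elif i == '(' or len(part) > 0: part += i
def pvAccStep (st : List Char × List Char) (c : Char) : List Char × List Char :=
  if c ≠ '(' ∧ st.1.length < 1 then (st.1, st.2 ++ [c])
  else if c = '(' ∨ st.1.length > 0 then (st.1 ++ [c], st.2)
  else st

-- one iteration of A's `for ele, i in enumerate(func)` body; `rest` is the list of the
-- characters after `c`, so `ele < len(func) - 1` is `rest ≠ []` and `func[ele+1]` is its head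
def pvStepA (c : Char) (rest : List Char)
    (st : List (List Char) × List (List Char) × List Char × List Char) :
    List (List Char) × List (List Char) × List Char × List Char :=
  let pc := pvAccStep (st.2.2.1, st.2.2.2) c
  let flush : Bool :=
    match rest with
    | r :: _ => decide (c = ')' ∧ r ≠ ')')
    | [] => decide (c = ')')
  if flush then
    (st.1 ++ [PySem.List.slice pc.1 (some 1) (some (-1))],   -- part = part[1:-1]; parts.append(part)
     st.2.1 ++ [if pc.2 = [] then ['+', '1'] else pc.2],     -- coefs.append('+1' if coef == '' else coef)
     [], [])
  else (st.1, st.2.1, pc.1, pc.2)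

def pvLoopA (cs : List Char)
    (st : List (List Char) × List (List Char) × List Char × List Char) :
    List (List Char) × List (List Char) × List Char × List Char :=
  match cs with
  | [] => st
  | c :: rest => pvLoopA rest (pvStepA c rest st)

def funcsplit (func : String) : List String × List String :=
  let st := pvLoopA func.toList ([], [], [], [])
  (st.1.map String.ofList, st.2.1.map String.ofList)

-- ===== PORT B =====
-- next_boundary: first index j with s[j] == ')' and (j == len(s)-1 or s[j+1] != ')')
def pvFindB (s : List Char) : Option Nat :=
  match s with
  | [] => none
  | c :: rest =>
    if c = ')' ∧ rest.head? ≠ some ')' then some 0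
    else (pvFindB rest).map (· + 1)

-- emit (part, coef) from one sliced segment:  k = seg.find('(');
-- part, coef = ('', seg) if k == -1 else (seg[k+1:-1], seg[:k])
def pvEmitB (seg : List Char) : List Char × List Char :=
  match PySem.List.index? seg '(' with
  | none => ([], seg)
  | some k => (PySem.List.slice seg (some ((k : Int) + 1)) (some (-1)),
               PySem.List.slice seg none (some (k : Int)))

lemma pvFindB_ne_nil {s : List Char} {j : Nat} (h : pvFindB s = some j) : s ≠ [] := by
  intro hs; subst hs; simp [pvFindB] at h

def pvSplitB (s : List Char) : List (List Char) × List (List Char) :=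
  match h : pvFindB s with
  | none => ([], [])
  | some j =>
    let pc := pvEmitB (s.take (j + 1))
    let tail := pvSplitB (s.drop (j + 1))
    (pc.1 :: tail.1, (if pc.2 = [] then ['+', '1'] else pc.2) :: tail.2)
termination_by s.length
decreasing_by
  have h0 : s ≠ [] := pvFindB_ne_nil h
  have h1 : 0 < s.length := List.length_pos_of_ne_nil h0
  simp [List.length_drop]; omega

def funcsplit_alt (func : String) : List String × List String :=
  let r := pvSplitB func.toList
  (r.1.map String.ofList, r.2.map String.ofList)

-- ===== PRECONDITION & SPEC =====
def Spec_funcsplit (func : String) (out : List String × List String) : Prop := out = funcsplit_alt func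
instance (func : String) (out : List String × List String) : Decidable (Spec_funcsplit func out) := by unfold Spec_funcsplit; infer_instance

-- ===== CLAIM (what is proved, stated in full; the proofs are below) =====
def Claim_equal_funcsplit : Prop := ∀ (func : String), Dom_funcsplit func → Spec_funcsplit func (funcsplit func)

-- ===== LEMMAS AND PROOFS =====

-- index of the first '(' in u (u.length if absent)
def pvIdx (u : List Char) : Nat :=
  match PySem.List.index? u '(' with
  | none => u.length
  | some k => k

lemma pvIdx_some {u : List Char} {k : Nat} (h : PySem.List.index? u '(' = some k) :
    pvIdx u = k := by unfold pvIdx; rw [h]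

lemma pvIdx_none {u : List Char} (h : PySem.List.index? u '(' = none) :
    pvIdx u = u.length := by unfold pvIdx; rw [h]

-- the (part, coef) state of A's loop after consuming the segment prefix u
def pvAcc (u : List Char) : List Char × List Char := u.foldl pvAccStep ([], [])

lemma pvAcc_append_singleton (u : List Char) (c : Char) :
    pvAcc (u ++ [c]) = pvAccStep (pvAcc u) c := by
  simp [pvAcc]

lemma slice_natCast_neg_one (xs : List Char) (a : Nat) :
    PySem.List.slice xs (some (a : Int)) (some (-1)) = (xs.drop a).dropLast := by
  simp only [PySem.List.slice, PySem.List.clampIdx, List.dropLast_eq_take, List.length_drop]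
  by_cases h : a ≤ xs.length
  · split_ifs with h0 h2 h3 <;> (simp_all; try omega)
  · have hd : List.drop a xs = [] := List.drop_eq_nil_of_le (by omega)
    have hd2 : List.drop (min (Int.toNat a) xs.length) xs = List.drop xs.length xs := by
      congr 1; omega
    split_ifs with h0 <;> (simp_all [List.drop_length]; try omega)

-- characterisation of A's in-segment state: coef is u up to the first '(', part is the remainder
lemma pvAcc_eq (u : List Char) : pvAcc u = (u.drop (pvIdx u), u.take (pvIdx u)) := by
  induction u using List.reverseRecOn with
  | nil => simp [pvAcc, pvIdx, PySem.List.index?]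
  | append_singleton u c ih =>
    rw [pvAcc_append_singleton, ih]
    by_cases hm : '(' ∈ u
    · obtain ⟨k, hk⟩ : ∃ k, PySem.List.index? u '(' = some k := by
        rcases Option.isSome_iff_exists.mp ((PySem.List.index?_isSome_iff u '(').mpr hm) with ⟨k, hk⟩
        exact ⟨k, hk⟩
      obtain ⟨hklt, hget, -⟩ := PySem.List.getElem_of_index?_eq_some hk
      have hidx2 : pvIdx (u ++ [c]) = k := by
        rw [pvIdx_some (by rw [PySem.List.index?_append_of_mem _ hm, hk])]
      rw [pvIdx_some hk, hidx2]
      simp only [pvAccStep]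
      rw [if_neg (by simp; omega), if_pos (Or.inr (by simp; omega))]
      rw [List.drop_append_of_le_length (by omega), List.take_append_of_le_length (by omega)]
    · have hk : PySem.List.index? u '(' = none := (PySem.List.index?_eq_none_iff u '(').mpr hm
      rw [pvIdx_none hk, List.drop_length, List.take_length]
      by_cases hc : c = '('
      · subst hc
        have hidx2 : pvIdx (u ++ ['(']) = u.length := by
          rw [pvIdx_some (PySem.List.index?_append_singleton_self u '(' hm)]
        rw [hidx2]
        simp [pvAccStep]
      · have hm2 : '(' ∉ u ++ [c] := by simp [hm, Ne.symm hc]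
        have hidx2 : pvIdx (u ++ [c]) = u.length + 1 := by
          rw [pvIdx_none ((PySem.List.index?_eq_none_iff _ '(').mpr hm2)]; simp
        rw [hidx2]
        simp [pvAccStep, hc, List.drop_eq_nil_of_le, List.take_of_length_le]

-- the pair A flushes from its in-segment state equals B's slice-based emit of the segment
lemma pvEmit_agree (seg : List Char) :
    (PySem.List.slice (pvAcc seg).1 (some 1) (some (-1)), (pvAcc seg).2) = pvEmitB seg := by
  rw [pvAcc_eq]
  unfold pvEmitB
  cases hk : PySem.List.index? seg '(' with
  | none =>
    rw [pvIdx_none hk, List.drop_length, List.take_length]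
    have : PySem.List.slice ([] : List Char) (some 1) (some (-1)) = [] := by
      simpa using slice_natCast_neg_one [] 1
    simp [this]
  | some k =>
    rw [pvIdx_some hk]
    have h1 : PySem.List.slice (List.drop k seg) (some 1) (some (-1)) =
        PySem.List.slice seg (some ((k : Int) + 1)) (some (-1)) := by
      rw [show ((k : Int) + 1) = ((k + 1 : Nat) : Int) by push_cast; ring, slice_natCast_neg_one]
      simpa [List.drop_drop, Nat.add_comm] using slice_natCast_neg_one (List.drop k seg) 1
    simp [h1, PySem.List.slice_to_natCast]

-- one segment of A's loop: starting with in-flight state pvAcc u, the loop runs to the next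
-- boundary of cs (if any), flushes exactly B's emit of u ++ (segment), and resets
lemma pvEmit_agree1 (seg : List Char) :
    PySem.List.slice (pvAcc seg).1 (some 1) (some (-1)) = (pvEmitB seg).1 := by
  rw [← pvEmit_agree]

lemma pvEmit_agree2 (seg : List Char) : (pvAcc seg).2 = (pvEmitB seg).2 := by
  rw [← pvEmit_agree]

lemma pvLoopA_cons (c : Char) (rest : List Char)
    (st : List (List Char) × List (List Char) × List Char × List Char) :
    pvLoopA (c :: rest) st = pvLoopA rest (pvStepA c rest st) := rfl

lemma pvLoopA_seg (cs : List Char) : ∀ (u : List Char) (P C : List (List Char)),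
    pvLoopA cs (P, C, (pvAcc u).1, (pvAcc u).2) =
      match pvFindB cs with
      | none => (P, C, (pvAcc (u ++ cs)).1, (pvAcc (u ++ cs)).2)
      | some j =>
          pvLoopA (cs.drop (j + 1))
            (P ++ [(pvEmitB (u ++ cs.take (j + 1))).1],
             C ++ [if (pvEmitB (u ++ cs.take (j + 1))).2 = [] then ['+', '1']
                   else (pvEmitB (u ++ cs.take (j + 1))).2],
             [], []) := by
  induction cs with
  | nil => intro u P C; simp [pvFindB, pvLoopA]
  | cons c rest ih =>
    intro u P C
    cases rest with
    | nil =>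
      by_cases hc : c = ')'
      · have hfb : pvFindB [c] = some 0 := by simp [pvFindB, hc]
        have hst : pvStepA c [] (P, C, (pvAcc u).1, (pvAcc u).2) =
            (P ++ [PySem.List.slice (pvAcc (u ++ [c])).1 (some 1) (some (-1))],
             C ++ [if (pvAcc (u ++ [c])).2 = [] then ['+', '1'] else (pvAcc (u ++ [c])).2],
             [], []) := by
          simp [pvStepA, ← pvAcc_append_singleton, hc]
        rw [hfb, pvLoopA_cons, hst, pvEmit_agree1, pvEmit_agree2]
        simp [pvLoopA]
      · have hfb : pvFindB [c] = none := by simp [pvFindB, hc]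
        have hst : pvStepA c [] (P, C, (pvAcc u).1, (pvAcc u).2) =
            (P, C, (pvAcc (u ++ [c])).1, (pvAcc (u ++ [c])).2) := by
          simp [pvStepA, ← pvAcc_append_singleton, hc]
        rw [hfb, pvLoopA_cons, hst]
        simp [pvLoopA]
    | cons r t =>
      by_cases hb : c = ')' ∧ r ≠ ')'
      · have hfb : pvFindB (c :: r :: t) = some 0 := by simp [pvFindB, hb.1, hb.2]
        have hst : pvStepA c (r :: t) (P, C, (pvAcc u).1, (pvAcc u).2) =
            (P ++ [PySem.List.slice (pvAcc (u ++ [c])).1 (some 1) (some (-1))],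
             C ++ [if (pvAcc (u ++ [c])).2 = [] then ['+', '1'] else (pvAcc (u ++ [c])).2],
             [], []) := by
          simp [pvStepA, ← pvAcc_append_singleton, hb.1, hb.2]
        rw [hfb, pvLoopA_cons, hst, pvEmit_agree1, pvEmit_agree2]
        simp
      · have hfb : pvFindB (c :: r :: t) = (pvFindB (r :: t)).map (· + 1) := by
          simp only [pvFindB]
          rw [if_neg (by simpa using hb)]
        have hst : pvStepA c (r :: t) (P, C, (pvAcc u).1, (pvAcc u).2) =
            (P, C, (pvAcc (u ++ [c])).1, (pvAcc (u ++ [c])).2) := by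
          simp [pvStepA, ← pvAcc_append_singleton, hb]
        rw [hfb, pvLoopA_cons, hst, ih (u ++ [c]) P C]
        cases hr : pvFindB (r :: t) with
        | none => simp
        | some j' => simp [List.take_succ_cons, List.drop_succ_cons]

-- the whole loop against B's splitter
lemma pvLoopA_split (cs : List Char) : ∀ (P C : List (List Char)),
    (pvLoopA cs (P, C, [], [])).1 = P ++ (pvSplitB cs).1 ∧
    (pvLoopA cs (P, C, [], [])).2.1 = C ++ (pvSplitB cs).2 := by
  induction hn : cs.length using Nat.strong_induction_on generalizing cs with
  | _ n ihn =>
    intro P C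
    have hseg := pvLoopA_seg cs [] P C
    simp only [show pvAcc [] = ([], []) from rfl, List.nil_append] at hseg
    rw [pvSplitB]
    cases hfb : pvFindB cs with
    | none =>
      rw [hfb] at hseg
      simp [hseg]
    | some j =>
      rw [hfb] at hseg
      rw [hseg]
      have hlt : (cs.drop (j + 1)).length < n := by
        have h1 : 0 < cs.length := List.length_pos_of_ne_nil (pvFindB_ne_nil hfb)
        simp [List.length_drop]; omega
      obtain ⟨ih1, ih2⟩ := ihn _ hlt (cs.drop (j + 1)) rfl
        (P ++ [(pvEmitB (cs.take (j + 1))).1])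
        (C ++ [if (pvEmitB (cs.take (j + 1))).2 = [] then ['+', '1']
               else (pvEmitB (cs.take (j + 1))).2])
      exact ⟨by simp [ih1], by simp [ih2]⟩

-- ===== VERDICT (by name: the statement is the Claim_ definition above) =====
theorem funcsplit_spec : Claim_equal_funcsplit := by
  intro func _
  unfold Spec_funcsplit funcsplit funcsplit_alt
  obtain ⟨h1, h2⟩ := pvLoopA_split func.toList [] []
  simp [h1, h2]
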